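-- pv_equiv track=rewrite | github.com/goku206125/Artificial-Intelligent | AI(labs)/[EARIN]_Lab2/directionalsweep.py | analyze_diagonal2
-- ===== SOURCE A (Python) =====
-- point_modifier = [0, 2, 5, 16, 50, 20000000]
--
-- def analyze_diagonal2(board, origin_row, origin_col, player_stones, scoring_player, blocking_player):
--     total_diagonal2_points = 0
--
--     max_possible_chain, row, col = get_start_point_diagonal2(board, origin_row, origin_col, player_stones, blocking_player)
--
--     if (max_possible_chain < 5):
--         return total_diagonal2_points
--
--     while (board[row][col] != player_stones[blocking_player] and col <= (origin_col + 4)):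
--         total_diagonal2_points += get_points_diagonal2(board, row, col, player_stones, scoring_player)
--
--         if (row == 0 or col == 14):
--             break
--         else:
--             row -= 1
--             col += 1
--
--     return total_diagonal2_points
--
-- def get_start_point_diagonal2 (board, origin_row, origin_col, player_stones, blocking_player):
--     row = origin_row
--     col = origin_col
--     max_possible_chain = 1
--
--     while (row != 14 and col != 0 and max_possible_chain < 5 and board[row + 1][col - 1] != player_stones[blocking_player]):
--         row += 1
--         col -= 1
--         max_possible_chain += 1
--
--     row = origin_row
--     col = origin_col
--
--     while (row != 0 and col != 14 and max_possible_chain < 5 and board[row - 1][col + 1] != player_stones[blocking_player]):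
--         row -= 1
--         col += 1
--         max_possible_chain += 1
--
--     return max_possible_chain, row, col
--
-- def get_points_diagonal2(board, row, col, player_stones, scoring_player):
--     stone_count = 0
--
--     if ((row + 4) != 14 and (col - 4) != 0 and board[row + 5][col - 5] == player_stones[scoring_player]):
--         return 0
--     elif (row != 0 and col != 14 and board[row - 1][col + 1] == player_stones[scoring_player]):
--         return 0
--
--     for j in range(5):
--         if (board[row + j][col - j] == player_stones[scoring_player]):
--             stone_count += 1
--
--     return point_modifier[stone_count]
-- ===== SOURCE B (Python) =====
-- point_modifier = [0, 2, 5, 16, 50, 20000000]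
--
-- def analyze_diagonal2(board, origin_row, origin_col, player_stones, scoring_player, blocking_player):
--     blocker = player_stones[blocking_player]
--
--     def reach(dr, dc, cap, wall_r, wall_c):
--         # how many steps the chain can extend from the origin in direction (dr, dc)
--         n = 0
--         while (n < cap and origin_row + dr * n != wall_r and origin_col + dc * n != wall_c
--                and board[origin_row + dr * (n + 1)][origin_col + dc * (n + 1)] != blocker):
--             n += 1
--         return n
--
--     down = reach(1, -1, 4, 14, 0)
--     up = reach(-1, 1, 4 - down, 0, 14)
--     if down + up < 4:
--         return 0
--
--     scorer = player_stones[scoring_player]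
--     sr, sc = origin_row - up, origin_col + up
--     cnt = sum(board[sr + j][sc - j] == scorer for j in range(5))
--     total = 0
--     for t in range(5 - up):
--         r, c = sr - t, sc + t
--         if board[r][c] == blocker:
--             break
--         suppressed = ((r + 4 != 14 and c - 4 != 0 and board[r + 5][c - 5] == scorer)
--                       or (r != 0 and c != 14 and board[r - 1][c + 1] == scorer))
--         if not suppressed:
--             total += point_modifier[cnt]
--         if r == 0 or c == 14:
--             break
--         cnt += (board[r - 1][c + 1] == scorer) - (board[r + 4][c - 4] == scorer)
--     return total
-- ===== Notes on version B (the rewrite author's own statement) =====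
-- stated objective: alternative
-- what changed: B replaces A's two specialised origin-walking extension loops by one direction-generic counter helper and replaces A's full 5-cell recount of every scoring window by an incrementally maintained sliding-window stone count over an index-driven scan of the window positions.
-- outside the precondition, e.g. on analyze_diagonal2([['a']], 14, 14, ['a'], 0, 5): A returns 0, B raises IndexError
import Mathlib
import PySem

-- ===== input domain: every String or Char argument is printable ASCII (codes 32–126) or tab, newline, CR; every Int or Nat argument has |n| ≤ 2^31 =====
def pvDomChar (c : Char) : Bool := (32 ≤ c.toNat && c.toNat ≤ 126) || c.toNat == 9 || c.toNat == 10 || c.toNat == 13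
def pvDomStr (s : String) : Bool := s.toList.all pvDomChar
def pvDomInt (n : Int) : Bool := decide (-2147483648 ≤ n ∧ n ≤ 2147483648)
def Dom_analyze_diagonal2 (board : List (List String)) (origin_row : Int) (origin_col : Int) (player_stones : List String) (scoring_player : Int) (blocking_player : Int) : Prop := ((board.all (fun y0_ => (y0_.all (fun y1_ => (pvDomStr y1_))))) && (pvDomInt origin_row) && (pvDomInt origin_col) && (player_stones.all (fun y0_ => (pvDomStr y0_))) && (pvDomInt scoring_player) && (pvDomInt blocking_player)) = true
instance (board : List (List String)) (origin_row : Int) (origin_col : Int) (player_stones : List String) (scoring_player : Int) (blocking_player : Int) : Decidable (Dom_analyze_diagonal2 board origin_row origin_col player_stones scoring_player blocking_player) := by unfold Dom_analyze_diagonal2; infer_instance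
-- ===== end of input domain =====

-- B replaces A's two specialised extension loops by one direction-generic counter loop and
-- A's full 5-cell recount per window by an incrementally maintained sliding-window stone count
-- (objective: alternative decomposition, same asymptotic cost).

-- board[r][c] (shared primitive: Python double indexing; none = the access Python raises on)
def pvCell (board : List (List String)) (r c : Int) : Option String :=
  (PySem.List.pyGet? board r).bind fun rw => PySem.List.pyGet? rw c

-- module constant point_modifier (shared by the Python module)
def pvPointModifier : List Int := [0, 2, 5, 16, 50, 20000000]

-- ===== PORT A =====

-- get_points_diagonal2
def pvGetPoints (board : List (List String)) (row col : Int) (player_stones : List String) (scoring_player : Int) : Int :=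
  let sp := PySem.List.pyGet? player_stones scoring_player
  if row + 4 ≠ 14 ∧ col - 4 ≠ 0 ∧ pvCell board (row + 5) (col - 5) = sp then 0
  else if row ≠ 0 ∧ col ≠ 14 ∧ pvCell board (row - 1) (col + 1) = sp then 0
  else
    let stone_count := (PySem.List.pyRange 0 5 1).foldl
      (fun acc j => if pvCell board (row + j) (col - j) = sp then acc + 1 else acc) 0
    (PySem.List.pyGet? pvPointModifier stone_count).getD 0

-- first while of get_start_point_diagonal2 (chain < 5 caps it at 4 iterations: fuel 4 is exact)
def pvGspLoop1 (board : List (List String)) (bp : Option String) : Nat → Int → Int → Int → Int × Int × Int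
  | 0, row, col, chain => (row, col, chain)
  | f + 1, row, col, chain =>
    if row ≠ 14 ∧ col ≠ 0 ∧ chain < 5 ∧ ¬ pvCell board (row + 1) (col - 1) = bp then
      pvGspLoop1 board bp f (row + 1) (col - 1) (chain + 1)
    else (row, col, chain)

-- second while of get_start_point_diagonal2
def pvGspLoop2 (board : List (List String)) (bp : Option String) : Nat → Int → Int → Int → Int × Int × Int
  | 0, row, col, chain => (row, col, chain)
  | f + 1, row, col, chain =>
    if row ≠ 0 ∧ col ≠ 14 ∧ chain < 5 ∧ ¬ pvCell board (row - 1) (col + 1) = bp then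
      pvGspLoop2 board bp f (row - 1) (col + 1) (chain + 1)
    else (row, col, chain)

-- get_start_point_diagonal2 (after the first loop row, col are reset to the origin)
def pvGetStartPoint (board : List (List String)) (origin_row origin_col : Int) (player_stones : List String) (blocking_player : Int) : Int × Int × Int :=
  let bp := PySem.List.pyGet? player_stones blocking_player
  let s1 := pvGspLoop1 board bp 4 origin_row origin_col 1
  let s2 := pvGspLoop2 board bp 4 origin_row origin_col s1.2.2
  (s2.2.2, s2.1, s2.2.1)

-- main while of analyze_diagonal2 (col starts ≥ origin_col and grows: ≤ 5 iterations, fuel 6 is exact)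
def pvMainLoop (board : List (List String)) (bp : Option String) (player_stones : List String) (scoring_player origin_col : Int) : Nat → Int → Int → Int → Int
  | 0, _, _, total => total
  | f + 1, row, col, total =>
    if ¬ pvCell board row col = bp ∧ col ≤ origin_col + 4 then
      let total' := total + pvGetPoints board row col player_stones scoring_player
      if row = 0 ∨ col = 14 then total'
      else pvMainLoop board bp player_stones scoring_player origin_col f (row - 1) (col + 1) total'
    else total

def analyze_diagonal2 (board : List (List String)) (origin_row : Int) (origin_col : Int) (player_stones : List String) (scoring_player : Int) (blocking_player : Int) : Int :=
  let s := pvGetStartPoint board origin_row origin_col player_stones blocking_player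
  if s.1 < 5 then 0
  else pvMainLoop board (PySem.List.pyGet? player_stones blocking_player) player_stones scoring_player origin_col 6 s.2.1 s.2.2 0

-- ===== PORT B =====

-- reach(dr, dc, cap, wall_r, wall_c): direction-generic extension counter (cap ≤ 4: fuel 4 is exact)
def pvReach (board : List (List String)) (blocker : Option String) (origin_row origin_col dr dc cap wall_r wall_c : Int) : Nat → Int → Int
  | 0, n => n
  | f + 1, n =>
    if n < cap ∧ origin_row + dr * n ≠ wall_r ∧ origin_col + dc * n ≠ wall_c ∧
        ¬ pvCell board (origin_row + dr * (n + 1)) (origin_col + dc * (n + 1)) = blocker then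
      pvReach board blocker origin_row origin_col dr dc cap wall_r wall_c f (n + 1)
    else n

-- cnt = sum(board[sr+j][sc-j] == scorer for j in range(5))
def pvWindowCnt (board : List (List String)) (sp : Option String) (sr sc : Int) : Int :=
  ((PySem.List.pyRange 0 5 1).map (fun j => if pvCell board (sr + j) (sc - j) = sp then (1 : Int) else 0)).sum

-- for t in range(5 - up), sliding the window count by one cell per step
def pvBMain (board : List (List String)) (blocker sp : Option String) (sr sc : Int) : List Int → Int → Int → Int
  | [], _, total => total
  | t :: ts, cnt, total =>
    let r := sr - t
    let c := sc + t
    if pvCell board r c = blocker then total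
    else
      let suppressed := (r + 4 ≠ 14 ∧ c - 4 ≠ 0 ∧ pvCell board (r + 5) (c - 5) = sp) ∨
                        (r ≠ 0 ∧ c ≠ 14 ∧ pvCell board (r - 1) (c + 1) = sp)
      let total' := if suppressed then total else total + (PySem.List.pyGet? pvPointModifier cnt).getD 0
      if r = 0 ∨ c = 14 then total'
      else pvBMain board blocker sp sr sc ts
             (cnt + ((if pvCell board (r - 1) (c + 1) = sp then (1 : Int) else 0)
                     - (if pvCell board (r + 4) (c - 4) = sp then (1 : Int) else 0))) total'

def analyze_diagonal2_alt (board : List (List String)) (origin_row : Int) (origin_col : Int) (player_stones : List String) (scoring_player : Int) (blocking_player : Int) : Int :=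
  let blocker := PySem.List.pyGet? player_stones blocking_player
  let down := pvReach board blocker origin_row origin_col 1 (-1) 4 14 0 4 0
  let up := pvReach board blocker origin_row origin_col (-1) 1 (4 - down) 0 14 4 0
  if down + up < 4 then 0
  else
    let scorer := PySem.List.pyGet? player_stones scoring_player
    let sr := origin_row - up
    let sc := origin_col + up
    pvBMain board blocker scorer sr sc (PySem.List.pyRange 0 (5 - up) 1) (pvWindowCnt board scorer sr sc) 0

-- ===== PRECONDITION & SPEC =====

-- One down-left extension step is taken at state s (no wall, the probed cell exists and is not the blocker)
def pvDTaken (board : List (List String)) (orow ocol : Int) (blk : Option String) (s : Nat) : Prop :=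
  orow + s ≠ 14 ∧ ocol - s ≠ 0 ∧ (pvCell board (orow + s + 1) (ocol - s - 1)).isSome ∧ ¬ pvCell board (orow + s + 1) (ocol - s - 1) = blk
-- The down-left walk stops safely at state k (a wall, or the probed cell exists and is the blocker)
def pvDStop (board : List (List String)) (orow ocol : Int) (blk : Option String) (k : Nat) : Prop :=
  orow + k = 14 ∨ ocol - k = 0 ∨ ((pvCell board (orow + k + 1) (ocol - k - 1)).isSome ∧ pvCell board (orow + k + 1) (ocol - k - 1) = blk)
def pvUTaken (board : List (List String)) (orow ocol : Int) (blk : Option String) (s : Nat) : Prop :=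
  orow - s ≠ 0 ∧ ocol + s ≠ 14 ∧ (pvCell board (orow - s - 1) (ocol + s + 1)).isSome ∧ ¬ pvCell board (orow - s - 1) (ocol + s + 1) = blk
def pvUStop (board : List (List String)) (orow ocol : Int) (blk : Option String) (k : Nat) : Prop :=
  orow - k = 0 ∨ ocol + k = 14 ∨ ((pvCell board (orow - k - 1) (ocol + k + 1)).isSome ∧ pvCell board (orow - k - 1) (ocol + k + 1) = blk)

-- Pre_ = the inputs on which the Python A returns without an IndexError: either the natural
-- 15×15-or-larger gomoku board with the origin on the grid and valid stone indices, or a board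
-- on which both chain walks stop safely (wall or blocker) with a total chain of at most 4, so
-- A returns 0 before any out-of-range access; it excludes a few inputs on which A still returns
-- (an out-of-range blocking index A never reads, or a small board whose wrapped-index reads let
-- the chain reach 5) — B naturally raises there, see the cited examples.
def Pre_analyze_diagonal2 (board : List (List String)) (origin_row : Int) (origin_col : Int) (player_stones : List String) (scoring_player : Int) (blocking_player : Int) : Prop :=
  (15 ≤ board.length ∧ (∀ row ∈ board, 15 ≤ row.length) ∧
   0 ≤ origin_row ∧ origin_row ≤ 14 ∧ 0 ≤ origin_col ∧ origin_col ≤ 14 ∧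
   0 ≤ scoring_player ∧ scoring_player < player_stones.length ∧
   0 ≤ blocking_player ∧ blocking_player < player_stones.length)
  ∨ (-(player_stones.length : Int) ≤ blocking_player ∧ blocking_player < (player_stones.length : Int) ∧
     ∃ k < 4,
       ((∀ s < k, pvDTaken board origin_row origin_col (PySem.List.pyGet? player_stones blocking_player) s) ∧
        pvDStop board origin_row origin_col (PySem.List.pyGet? player_stones blocking_player) k ∧
        ∃ m < 4 - k,
          ((∀ s < m, pvUTaken board origin_row origin_col (PySem.List.pyGet? player_stones blocking_player) s) ∧
           pvUStop board origin_row origin_col (PySem.List.pyGet? player_stones blocking_player) m)))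
instance (board : List (List String)) (origin_row : Int) (origin_col : Int) (player_stones : List String) (scoring_player : Int) (blocking_player : Int) : Decidable (Pre_analyze_diagonal2 board origin_row origin_col player_stones scoring_player blocking_player) := by unfold Pre_analyze_diagonal2 pvDTaken pvDStop pvUTaken pvUStop; infer_instance

def pvWitness_analyze_diagonal2 : List (List String) × Int × Int × List String × Int × Int :=
  (List.replicate 15 (List.replicate 15 " "), 7, 7, ["1", "2"], 0, 1)

def Spec_analyze_diagonal2 (board : List (List String)) (origin_row : Int) (origin_col : Int) (player_stones : List String) (scoring_player : Int) (blocking_player : Int) (out : Int) : Prop := out = analyze_diagonal2_alt board origin_row origin_col player_stones scoring_player blocking_player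
instance (board : List (List String)) (origin_row : Int) (origin_col : Int) (player_stones : List String) (scoring_player : Int) (blocking_player : Int) (out : Int) : Decidable (Spec_analyze_diagonal2 board origin_row origin_col player_stones scoring_player blocking_player out) := by unfold Spec_analyze_diagonal2; infer_instance

-- ===== CLAIM (what is proved, stated in full; the proofs are below) =====
def Claim_equal_analyze_diagonal2 : Prop := ∀ (board : List (List String)) (origin_row : Int) (origin_col : Int) (player_stones : List String) (scoring_player : Int) (blocking_player : Int), Dom_analyze_diagonal2 board origin_row origin_col player_stones scoring_player blocking_player → Pre_analyze_diagonal2 board origin_row origin_col player_stones scoring_player blocking_player → Spec_analyze_diagonal2 board origin_row origin_col player_stones scoring_player blocking_player (analyze_diagonal2 board origin_row origin_col player_stones scoring_player blocking_player)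

-- ===== LEMMAS AND PROOFS =====

-- A's first extension loop simulates B's reach(1, -1, 4, 14, 0)
lemma gsp1_sim (board : List (List String)) (bp : Option String) (r0 c0 : Int) :
    ∀ (f : Nat) (n : Int),
      pvGspLoop1 board bp f (r0 + n) (c0 - n) (1 + n)
        = (r0 + pvReach board bp r0 c0 1 (-1) 4 14 0 f n,
           c0 - pvReach board bp r0 c0 1 (-1) 4 14 0 f n,
           1 + pvReach board bp r0 c0 1 (-1) 4 14 0 f n) := by
  intro f
  induction f with
  | zero => intro n; rfl
  | succ f ih =>
    intro n
    simp only [pvGspLoop1, pvReach]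
    have e1 : (1 : Int) * n = n := by ring
    have e2 : (-1 : Int) * n = -n := by ring
    have e3 : (1 : Int) * (n + 1) = n + 1 := by ring
    have e4 : (-1 : Int) * (n + 1) = -(n + 1) := by ring
    rw [e1, e2, e3, e4]
    by_cases hc : r0 + n ≠ 14 ∧ c0 - n ≠ 0 ∧ 1 + n < 5 ∧ ¬ pvCell board (r0 + n + 1) (c0 - n - 1) = bp
    · have hc' : n < 4 ∧ r0 + n ≠ 14 ∧ c0 + -n ≠ 0 ∧ ¬ pvCell board (r0 + (n + 1)) (c0 + -(n + 1)) = bp := by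
        obtain ⟨h1, h2, h3, h4⟩ := hc
        refine ⟨by omega, h1, by omega, ?_⟩
        have : c0 + -(n + 1) = c0 - n - 1 := by ring
        rw [this]; have : r0 + (n + 1) = r0 + n + 1 := by ring
        rw [this]; exact h4
      rw [if_pos hc, if_pos hc']
      have := ih (n + 1)
      have er : r0 + n + 1 = r0 + (n + 1) := by ring
      have ec : c0 - n - 1 = c0 - (n + 1) := by ring
      have echain : 1 + n + 1 = 1 + (n + 1) := by ring
      rw [er, ec, echain, this]
    · have hc' : ¬ (n < 4 ∧ r0 + n ≠ 14 ∧ c0 + -n ≠ 0 ∧ ¬ pvCell board (r0 + (n + 1)) (c0 + -(n + 1)) = bp) := by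
        intro ⟨h1, h2, h3, h4⟩
        apply hc
        refine ⟨h2, by omega, by omega, ?_⟩
        have e : c0 - n - 1 = c0 + -(n + 1) := by ring
        rw [e]; have e' : r0 + n + 1 = r0 + (n + 1) := by ring
        rw [e']; exact h4
      rw [if_neg hc, if_neg hc']

-- A's second extension loop (chain already 1 + d) simulates B's reach(-1, 1, 4 - d, 0, 14)
lemma gsp2_sim (board : List (List String)) (bp : Option String) (r0 c0 d : Int) :
    ∀ (f : Nat) (n : Int),
      pvGspLoop2 board bp f (r0 - n) (c0 + n) (1 + d + n)
        = (r0 - pvReach board bp r0 c0 (-1) 1 (4 - d) 0 14 f n,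
           c0 + pvReach board bp r0 c0 (-1) 1 (4 - d) 0 14 f n,
           1 + d + pvReach board bp r0 c0 (-1) 1 (4 - d) 0 14 f n) := by
  intro f
  induction f with
  | zero => intro n; rfl
  | succ f ih =>
    intro n
    simp only [pvGspLoop2, pvReach]
    have e1 : (-1 : Int) * n = -n := by ring
    have e2 : (1 : Int) * n = n := by ring
    have e3 : (-1 : Int) * (n + 1) = -(n + 1) := by ring
    have e4 : (1 : Int) * (n + 1) = n + 1 := by ring
    rw [e1, e2, e3, e4]
    by_cases hc : r0 - n ≠ 0 ∧ c0 + n ≠ 14 ∧ 1 + d + n < 5 ∧ ¬ pvCell board (r0 - n - 1) (c0 + n + 1) = bp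
    · have hc' : n < 4 - d ∧ r0 + -n ≠ 0 ∧ c0 + n ≠ 14 ∧ ¬ pvCell board (r0 + -(n + 1)) (c0 + (n + 1)) = bp := by
        obtain ⟨h1, h2, h3, h4⟩ := hc
        refine ⟨by omega, by omega, h2, ?_⟩
        have : r0 + -(n + 1) = r0 - n - 1 := by ring
        rw [this]; have : c0 + (n + 1) = c0 + n + 1 := by ring
        rw [this]; exact h4
      rw [if_pos hc, if_pos hc']
      have := ih (n + 1)
      have er : r0 - n - 1 = r0 - (n + 1) := by ring
      have ec : c0 + n + 1 = c0 + (n + 1) := by ring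
      have echain : 1 + d + n + 1 = 1 + d + (n + 1) := by ring
      rw [er, ec, echain, this]
    · have hc' : ¬ (n < 4 - d ∧ r0 + -n ≠ 0 ∧ c0 + n ≠ 14 ∧ ¬ pvCell board (r0 + -(n + 1)) (c0 + (n + 1)) = bp) := by
        intro ⟨h1, h2, h3, h4⟩
        apply hc
        refine ⟨h2, h3, by omega, ?_⟩
        have e : r0 - n - 1 = r0 + -(n + 1) := by ring
        rw [e]; have e' : c0 + n + 1 = c0 + (n + 1) := by ring
        rw [e']; exact h4
      rw [if_neg hc, if_neg hc']

-- reach never decreases its counter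
lemma pvReach_ge (board : List (List String)) (bl : Option String) (r0 c0 dr dc cap wr wc : Int) :
    ∀ (f : Nat) (n : Int), n ≤ pvReach board bl r0 c0 dr dc cap wr wc f n := by
  intro f
  induction f with
  | zero => intro n; simp [pvReach]
  | succ f ih =>
    intro n
    simp only [pvReach]
    split
    · exact le_trans (by omega) (ih (n + 1))
    · omega

-- A's per-window recount equals B's window-count expression
lemma windowCnt_eq (board : List (List String)) (sp : Option String) (r c : Int) :
    (PySem.List.pyRange 0 5 1).foldl
        (fun acc j => if pvCell board (r + j) (c - j) = sp then acc + 1 else acc) 0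
      = pvWindowCnt board sp r c := by
  have h5 : PySem.List.pyRange 0 5 1 = [0, 1, 2, 3, 4] := by decide
  simp only [pvWindowCnt, h5, List.foldl, List.map, List.sum_cons, List.sum_nil]
  split_ifs <;> ring

-- sliding the window one step up-right
lemma windowCnt_shift (board : List (List String)) (sp : Option String) (r c : Int) :
    pvWindowCnt board sp (r - 1) (c + 1)
      = pvWindowCnt board sp r c
        + ((if pvCell board (r - 1) (c + 1) = sp then (1 : Int) else 0)
           - (if pvCell board (r + 4) (c - 4) = sp then (1 : Int) else 0)) := by
  have h5 : PySem.List.pyRange 0 5 1 = [0, 1, 2, 3, 4] := by decide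
  simp only [pvWindowCnt, h5, List.map, List.sum_cons, List.sum_nil]
  have e0 : r - 1 + 0 = r - 1 := by ring
  have f0 : c + 1 - 0 = c + 1 := by ring
  have e1 : r - 1 + 1 = r + 0 := by ring
  have f1 : c + 1 - 1 = c - 0 := by ring
  have e2 : r - 1 + 2 = r + 1 := by ring
  have f2 : c + 1 - 2 = c - 1 := by ring
  have e3 : r - 1 + 3 = r + 2 := by ring
  have f3 : c + 1 - 3 = c - 2 := by ring
  have e4 : r - 1 + 4 = r + 3 := by ring
  have f4 : c + 1 - 4 = c - 3 := by ring
  rw [e0, f0, e1, f1, e2, f2, e3, f3, e4, f4]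
  split_ifs <;> ring

-- get_points_diagonal2 as suppression + window count
lemma getPoints_eq (board : List (List String)) (ps : List String) (spi r c : Int) :
    pvGetPoints board r c ps spi
      = (if (r + 4 ≠ 14 ∧ c - 4 ≠ 0 ∧ pvCell board (r + 5) (c - 5) = PySem.List.pyGet? ps spi) ∨
            (r ≠ 0 ∧ c ≠ 14 ∧ pvCell board (r - 1) (c + 1) = PySem.List.pyGet? ps spi)
         then 0
         else (PySem.List.pyGet? pvPointModifier (pvWindowCnt board (PySem.List.pyGet? ps spi) r c)).getD 0) := by
  simp only [pvGetPoints, windowCnt_eq]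
  by_cases h1 : r + 4 ≠ 14 ∧ c - 4 ≠ 0 ∧ pvCell board (r + 5) (c - 5) = PySem.List.pyGet? ps spi
  · simp [h1]
  · by_cases h2 : r ≠ 0 ∧ c ≠ 14 ∧ pvCell board (r - 1) (c + 1) = PySem.List.pyGet? ps spi
    · simp [h1, h2]
    · simp [h1, h2]

-- A's main loop simulates B's sliding-window scan over the remaining range
lemma main_sim (board : List (List String)) (bp : Option String) (ps : List String) (spi c0 sr sc u : Int)
    (hsc : sc = c0 + u) :
    ∀ (f : Nat) (t total : Int), 5 - u - t ≤ (f : Int) →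
      pvMainLoop board bp ps spi c0 f (sr - t) (sc + t) total
        = pvBMain board bp (PySem.List.pyGet? ps spi) sr sc (PySem.List.pyRange t (5 - u) 1)
            (pvWindowCnt board (PySem.List.pyGet? ps spi) (sr - t) (sc + t)) total := by
  intro f
  induction f with
  | zero =>
    intro t total hf
    have hempty : PySem.List.pyRange t (5 - u) 1 = [] := by
      rw [PySem.List.pyRange_one]
      have : (5 - u - t).toNat = 0 := by omega
      simp [this]
    rw [hempty]
    rfl
  | succ f ih =>
    intro t total hf
    by_cases ht : t < 5 - u
    · rw [PySem.List.pyRange_one_cons ht]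
      simp only [pvMainLoop, pvBMain]
      by_cases hbl : pvCell board (sr - t) (sc + t) = bp
      · have hcond : ¬ (¬ pvCell board (sr - t) (sc + t) = bp ∧ sc + t ≤ c0 + 4) := by
          intro ⟨h, _⟩; exact h hbl
        rw [if_neg hcond, if_pos hbl]
      · have hcond : ¬ pvCell board (sr - t) (sc + t) = bp ∧ sc + t ≤ c0 + 4 :=
          ⟨hbl, by omega⟩
        rw [if_pos hcond, if_neg hbl]
        rw [getPoints_eq]
        by_cases hbrk : sr - t = 0 ∨ sc + t = 14
        · rw [if_pos hbrk, if_pos hbrk]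
          by_cases hsupp : (sr - t + 4 ≠ 14 ∧ sc + t - 4 ≠ 0 ∧ pvCell board (sr - t + 5) (sc + t - 5) = PySem.List.pyGet? ps spi) ∨
              (sr - t ≠ 0 ∧ sc + t ≠ 14 ∧ pvCell board (sr - t - 1) (sc + t + 1) = PySem.List.pyGet? ps spi)
          · rw [if_pos hsupp, if_pos hsupp]; ring
          · rw [if_neg hsupp, if_neg hsupp]
        · rw [if_neg hbrk, if_neg hbrk]
          have er : sr - t - 1 = sr - (t + 1) := by ring
          have ec : sc + t + 1 = sc + (t + 1) := by ring
          have hshift := windowCnt_shift board (PySem.List.pyGet? ps spi) (sr - t) (sc + t)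
          rw [er, ec] at hshift
          have hrec := ih (t + 1) (total + (if (sr - t + 4 ≠ 14 ∧ sc + t - 4 ≠ 0 ∧ pvCell board (sr - t + 5) (sc + t - 5) = PySem.List.pyGet? ps spi) ∨
              (sr - t ≠ 0 ∧ sc + t ≠ 14 ∧ pvCell board (sr - t - 1) (sc + t + 1) = PySem.List.pyGet? ps spi)
            then 0 else (PySem.List.pyGet? pvPointModifier (pvWindowCnt board (PySem.List.pyGet? ps spi) (sr - t) (sc + t))).getD 0)) (by omega)
          by_cases hsupp : (sr - t + 4 ≠ 14 ∧ sc + t - 4 ≠ 0 ∧ pvCell board (sr - t + 5) (sc + t - 5) = PySem.List.pyGet? ps spi) ∨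
              (sr - t ≠ 0 ∧ sc + t ≠ 14 ∧ pvCell board (sr - t - 1) (sc + t + 1) = PySem.List.pyGet? ps spi)
          · rw [if_pos hsupp] at hrec ⊢
            rw [if_pos hsupp]
            rw [er, ec, hrec, hshift]
            ring_nf
          · rw [if_neg hsupp] at hrec ⊢
            rw [if_neg hsupp]
            rw [er, ec, hrec, hshift]
    · have hempty : PySem.List.pyRange t (5 - u) 1 = [] := by
        rw [PySem.List.pyRange_one]
        have : (5 - u - t).toNat = 0 := by omega
        simp [this]
      rw [hempty]
      simp only [pvMainLoop, pvBMain]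
      have hcond : ¬ (¬ pvCell board (sr - t) (sc + t) = bp ∧ sc + t ≤ c0 + 4) := by
        intro ⟨_, h⟩; omega
      rw [if_neg hcond]

-- ===== VERDICT (by name: the statement is the Claim_ definition above) =====
theorem analyze_diagonal2_spec : Claim_equal_analyze_diagonal2 := by
  intro board r0 c0 ps spi bpi _ _
  unfold Spec_analyze_diagonal2
  simp only [analyze_diagonal2, analyze_diagonal2_alt, pvGetStartPoint]
  have h1 := gsp1_sim board (PySem.List.pyGet? ps bpi) r0 c0 4 0
  simp only [add_zero, sub_zero] at h1
  rw [h1]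
  dsimp only
  have h2 := gsp2_sim board (PySem.List.pyGet? ps bpi) r0 c0
      (pvReach board (PySem.List.pyGet? ps bpi) r0 c0 1 (-1) 4 14 0 4 0) 4 0
  simp only [add_zero, sub_zero] at h2
  rw [h2]
  dsimp only
  have hu0 := pvReach_ge board (PySem.List.pyGet? ps bpi) r0 c0 (-1) 1
      (4 - pvReach board (PySem.List.pyGet? ps bpi) r0 c0 1 (-1) 4 14 0 4 0) 0 14 4 0
  by_cases hch : pvReach board (PySem.List.pyGet? ps bpi) r0 c0 1 (-1) 4 14 0 4 0
      + pvReach board (PySem.List.pyGet? ps bpi) r0 c0 (-1) 1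
          (4 - pvReach board (PySem.List.pyGet? ps bpi) r0 c0 1 (-1) 4 14 0 4 0) 0 14 4 0 < 4
  · rw [if_pos (by omega), if_pos hch]
  · rw [if_neg (by omega), if_neg hch]
    have hm := main_sim board (PySem.List.pyGet? ps bpi) ps spi c0
        (r0 - pvReach board (PySem.List.pyGet? ps bpi) r0 c0 (-1) 1
            (4 - pvReach board (PySem.List.pyGet? ps bpi) r0 c0 1 (-1) 4 14 0 4 0) 0 14 4 0)
        (c0 + pvReach board (PySem.List.pyGet? ps bpi) r0 c0 (-1) 1
            (4 - pvReach board (PySem.List.pyGet? ps bpi) r0 c0 1 (-1) 4 14 0 4 0) 0 14 4 0)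
        (pvReach board (PySem.List.pyGet? ps bpi) r0 c0 (-1) 1
            (4 - pvReach board (PySem.List.pyGet? ps bpi) r0 c0 1 (-1) 4 14 0 4 0) 0 14 4 0)
        rfl 6 0 0 (by omega)
    simpa using hm
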